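-- pv_equiv track=rewrite | github.com/Barsh4ec/python-online-marathon | Sprint2/Task1.py | double_string
-- ===== SOURCE A (Python) =====
-- def double_string(data):
--     counter = 0
--     mas = []
--     for item1 in data:
--         for item2 in data:
--             if item1+item2 not in mas:
--                 counter += data.count(item1+item2)
--                 mas.append(item1+item2)
--     return counter
-- ===== SOURCE B (Python) =====
-- def double_string(data):
--     chars = set(data)
--     total = 0
--     for a in chars:
--         for b in chars:
--             total += data.count(a + b)
--     return total
-- ===== Notes on version B (the rewrite author's own statement) =====
-- stated objective: faster
-- what changed: B sums data.count(a+b) once over each ordered pair of DISTINCT characters (set(data)), eliminating A's nested scan over all character occurrences and its growing seen-list membership test.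
import Mathlib
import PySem

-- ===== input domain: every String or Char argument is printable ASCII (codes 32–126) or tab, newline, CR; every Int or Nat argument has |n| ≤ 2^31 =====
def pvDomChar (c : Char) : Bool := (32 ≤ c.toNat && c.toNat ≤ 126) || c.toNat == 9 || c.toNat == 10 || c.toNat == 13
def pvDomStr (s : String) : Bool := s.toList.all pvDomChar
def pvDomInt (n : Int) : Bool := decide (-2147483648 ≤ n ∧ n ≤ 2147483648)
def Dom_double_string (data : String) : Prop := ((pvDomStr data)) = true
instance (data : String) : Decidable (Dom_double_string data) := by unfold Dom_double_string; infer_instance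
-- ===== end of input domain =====

-- B iterates over the DISTINCT characters only (a set), adding data.count(a+b) once per
-- distinct ordered pair, instead of A's scan over all character occurrences with a
-- seen-list membership test; objective: faster (fewer pairs, no seen-list scans).

-- ===== PORT A =====
-- literal transliteration of A: nested loop over all characters of data, a seen-list
-- `mas` of two-char strings, `counter += data.count(item1+item2)` on first sight.
def double_string (data : String) : Int :=
  let cs := data.toList
  let r :=
    cs.foldl
      (fun (s : Int × List String) item1 =>
        cs.foldl
          (fun (s : Int × List String) item2 =>
            let p := String.ofList [item1, item2]
            if p ∈ s.2 then s
            else (s.1 + (PySem.Str.count data p : Int), s.2 ++ [p]))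
          s)
      (0, [])
  r.1

-- ===== PORT B =====
-- transliteration of Source B: chars = set(data); sum data.count(a+b) over a, b in chars
-- (a set's iteration order cannot affect the sum).
def double_string_alt (data : String) : Int :=
  let chars := PySem.Set.ofList data.toList
  chars.foldl
    (fun (total : Int) a =>
      chars.foldl
        (fun (total : Int) b => total + (PySem.Str.count data (String.ofList [a, b]) : Int))
        total)
    0

-- ===== PRECONDITION & SPEC =====
def Spec_double_string (data : String) (out : Int) : Prop := out = double_string_alt data
instance (data : String) (out : Int) : Decidable (Spec_double_string data out) := by unfold Spec_double_string; infer_instance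

-- ===== CLAIM (what is proved, stated in full; the proofs are below) =====
def Claim_equal_double_string : Prop := ∀ (data : String), Dom_double_string data → Spec_double_string data (double_string data)

-- ===== LEMMAS AND PROOFS =====

-- the two-char pair-to-string encoding is injective
theorem pvPair_inj {a b c d : Char} (h : String.ofList [a, b] = String.ofList [c, d]) :
    a = c ∧ b = d := by
  have h2 := congrArg String.toList h
  simp at h2
  exact h2

-- A's loop body, applied to the flattened stream of pair strings
def pvStep (data : String) (s : Int × List String) (p : String) : Int × List String :=
  if p ∈ s.2 then s else (s.1 + (PySem.Str.count data p : Int), s.2 ++ [p])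

-- the list of all pair strings over a list of characters
def pvPairs (cs : List Char) : List String :=
  cs.flatMap (fun a => cs.map (fun b => String.ofList [a, b]))

-- invariant of A's dedup-and-sum fold: the counter is the sum of data.count over the
-- distinct pair strings seen so far, and the seen-list stays nodup
theorem pvStep_fold (data : String) :
    ∀ (l : List String) (c : Int) (m : List String), m.Nodup →
      ∃ new : List String,
        (l.foldl (pvStep data) (c, m)).2 = m ++ new ∧
        (m ++ new).Nodup ∧
        (∀ q, q ∈ new ↔ q ∉ m ∧ q ∈ l) ∧
        (l.foldl (pvStep data) (c, m)).1 = c + (new.map (fun p => (PySem.Str.count data p : Int))).sum := by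
  intro l
  induction l with
  | nil =>
    intro c m hm
    exact ⟨[], by simp, by simpa using hm, by simp, by simp⟩
  | cons p t ih =>
    intro c m hm
    by_cases hp : p ∈ m
    · obtain ⟨new, h2, hnd, hmem, h1⟩ := ih c m hm
      refine ⟨new, ?_, hnd, ?_, ?_⟩
      · simpa [pvStep, hp] using h2
      · intro q
        rw [hmem q]
        constructor
        · rintro ⟨hq, hqt⟩; exact ⟨hq, by simp [hqt]⟩
        · rintro ⟨hq, hqpt⟩
          rcases List.mem_cons.mp hqpt with rfl | hqt
          · exact absurd hp hq
          · exact ⟨hq, hqt⟩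
      · simpa [pvStep, hp] using h1
    · have hm' : (m ++ [p]).Nodup := by
        rw [List.nodup_append]
        refine ⟨hm, List.nodup_singleton p, ?_⟩
        intro a ha b hb
        have hb' : b = p := by simpa using hb
        subst hb'
        exact fun h => hp (h ▸ ha)
      obtain ⟨new, h2, hnd, hmem, h1⟩ := ih (c + (PySem.Str.count data p : Int)) (m ++ [p]) hm'
      refine ⟨p :: new, ?_, ?_, ?_, ?_⟩
      · simpa [pvStep, hp, List.append_assoc] using h2
      · simpa [List.append_assoc] using hnd
      · intro q
        constructor
        · intro hq
          rcases List.mem_cons.mp hq with rfl | hq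
          · exact ⟨hp, by simp⟩
          · have := (hmem q).mp hq
            refine ⟨fun h => this.1 (by simp [h]), by simp [this.2]⟩
        · rintro ⟨hq, hqpt⟩
          rcases List.mem_cons.mp hqpt with rfl | hqt
          · exact List.mem_cons_self
          · by_cases hqp : q = p
            · simp [hqp]
            · exact List.mem_cons_of_mem _ ((hmem q).mpr ⟨by simp [hq, hqp], hqt⟩)
      · simp only [List.foldl_cons, pvStep, if_neg hp] at h1 ⊢
        rw [h1]; simp; ring

-- the pair strings over a nodup character list are nodup
theorem pvPairs_nodup (D : List Char) (hD : D.Nodup) : (pvPairs D).Nodup := by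
  rw [pvPairs, List.nodup_flatMap]
  refine ⟨fun a _ => (List.nodup_map_iff_inj_on hD).mpr
      (fun b _ b' _ h => (pvPair_inj h).2), ?_⟩
  refine hD.imp ?_
  intro a a' hne q hq hq'
  obtain ⟨b, _, rfl⟩ := List.mem_map.mp hq
  obtain ⟨b', _, hb'⟩ := List.mem_map.mp hq'
  exact hne ((pvPair_inj hb'.symm).1)

-- A as a single dedup-and-sum fold over all pair strings
theorem pvA_eq (data : String) :
    double_string data = ((pvPairs data.toList).foldl (pvStep data) (0, [])).1 := by
  unfold double_string
  simp only []
  rw [pvPairs, List.foldl_flatMap]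
  congr 1
  refine PySem.List.foldl_congr_mem _ _ _ _ (fun s a _ => ?_)
  rw [List.foldl_map]
  rfl

-- B as the sum of data.count over the distinct pair strings
theorem pvB_eq (data : String) :
    double_string_alt data
      = ((pvPairs (PySem.Set.ofList data.toList)).map
          (fun p => (PySem.Str.count data p : Int))).sum := by
  unfold double_string_alt
  simp only []
  set D : List Char := PySem.Set.ofList data.toList with hD
  set f : String → Int := fun p => (PySem.Str.count data p : Int) with hf
  have hinner : ∀ (a : Char) (t : Int),
      D.foldl (fun (total : Int) b => total + f (String.ofList [a, b])) t
        = t + ((D.map (fun b => String.ofList [a, b])).map f).sum := by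
    intro a t
    rw [PySem.List.foldl_add D (fun b => f (String.ofList [a, b])) t]
    simp [List.map_map, Function.comp_def]
  calc D.foldl (fun (total : Int) a =>
        D.foldl (fun (total : Int) b => total + f (String.ofList [a, b])) total) 0
      = D.foldl (fun (total : Int) a =>
          total + ((D.map (fun b => String.ofList [a, b])).map f).sum) 0 :=
        PySem.List.foldl_congr_mem _ _ _ _ (fun acc a _ => hinner a acc)
    _ = ((D.map (fun a => ((D.map (fun b => String.ofList [a, b])).map f).sum)).sum) := by
        rw [PySem.List.foldl_add]; simp
    _ = ((pvPairs D).map f).sum := by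
        rw [pvPairs, List.map_flatMap, List.flatMap_def, List.sum_flatten, List.map_map]
        rfl

-- ===== VERDICT (by name: the statement is the Claim_ definition above) =====
theorem double_string_spec : Claim_equal_double_string := by
  intro data _
  unfold Spec_double_string
  obtain ⟨new, -, hnd, hmem, h1⟩ :=
    pvStep_fold data (pvPairs data.toList) 0 [] List.nodup_nil
  have hnewnd : new.Nodup := by simpa using hnd
  have hperm : new.Perm (pvPairs (PySem.Set.ofList data.toList)) := by
    rw [List.perm_ext_iff_of_nodup hnewnd
      (pvPairs_nodup _ (PySem.Set.nodup_ofList data.toList))]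
    intro q
    rw [hmem q]
    simp only [pvPairs, List.mem_flatMap, List.mem_map, PySem.Set.mem_ofList,
      List.not_mem_nil, not_false_iff, true_and]
  rw [pvA_eq, pvB_eq, h1,
    ← (hperm.map (fun p => (PySem.Str.count data p : Int))).sum_eq]
  simp
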